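-- pv_equiv track=rewrite | github.com/uuinfolab/Structure_and_dynamics_of_growing_networks_of_Reddit_threads | src/utilities.py | compute_reciprocity
-- ===== SOURCE A (Python) =====
-- from collections import Counter
--
-- def compute_groups(lst):
--     groups = {}
--     for tup in lst:
--         x, y, _ = tup
--         if (x, y) in groups:
--             groups[(x, y)].append(tup)
--         elif (y, x) in groups:
--             groups[(y, x)].append(tup)
--         else:
--             groups[(x, y)] = [tup]
--     grouped_tuples = list(groups.values())
--     return grouped_tuples
--
-- def compute_reciprocity(lst):
--     grouped_tuples = compute_groups(lst)
--     yes_rec = [group for group in grouped_tuples if len(group) > 1]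
--     no_rec = [group for group in grouped_tuples if len(group) == 1]
--
--     yes_rec_actors = [group[0][0] for group in yes_rec] + [group[0][1] for group in yes_rec]
--     yes_rec_actors = Counter(yes_rec_actors)  # dict{actor: how many reciprocical edges has}
--
--     no_rec_actors = [group[0][0] for group in no_rec] + [group[0][1] for group in no_rec]
--
--     return yes_rec_actors
-- ===== SOURCE B (Python) =====
-- from collections import Counter
--
-- def _same(p, q):
--     return p == q or p == (q[1], q[0])
--
-- def compute_reciprocity(lst):
--     # An edge starts a reciprocal group iff its unordered pair has no earlier
--     # occurrence and at least one later occurrence; credit both endpoints of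
--     # that first (oriented) occurrence.
--     pairs = [(x, y) for x, y, _ in lst]
--     reps = [p for i, p in enumerate(pairs)
--             if not any(_same(p, q) for q in pairs[:i])
--             and any(_same(p, q) for q in pairs[i + 1:])]
--     return Counter([x for x, _ in reps] + [y for _, y in reps])
-- ===== Notes on version B (the rewrite author's own statement) =====
-- stated objective: alternative
-- what changed: B removes A's grouping dict entirely: it never builds per-pair groups, instead classifying each edge positionally (a pair is a reciprocal representative iff its unordered pair has no earlier occurrence and at least one later occurrence in the list) via direct scans of the prefix and suffix, then counts the representatives' endpoints with one Counter.
import Mathlib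
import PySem

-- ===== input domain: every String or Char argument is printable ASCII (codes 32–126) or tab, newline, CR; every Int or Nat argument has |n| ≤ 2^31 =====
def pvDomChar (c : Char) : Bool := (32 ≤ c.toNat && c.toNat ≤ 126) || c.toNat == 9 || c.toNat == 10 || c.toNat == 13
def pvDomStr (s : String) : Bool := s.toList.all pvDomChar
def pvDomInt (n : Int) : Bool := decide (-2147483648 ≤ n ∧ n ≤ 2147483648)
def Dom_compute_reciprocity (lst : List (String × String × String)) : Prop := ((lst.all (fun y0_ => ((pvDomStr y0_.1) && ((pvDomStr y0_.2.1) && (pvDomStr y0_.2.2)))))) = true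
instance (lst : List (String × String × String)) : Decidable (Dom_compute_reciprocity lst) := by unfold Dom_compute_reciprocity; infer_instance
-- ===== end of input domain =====

-- B drops A's grouping dict: it classifies each edge by positional prefix/suffix scans
-- (first occurrence of its unordered pair + a later occurrence) instead of building groups;
-- an alternative decomposition, not claimed faster.

-- ===== PORT A =====
-- loop body of compute_groups (named so the proofs can refer to it)
def pvStepA (groups : PySem.Dict (String × String) (List (String × String × String)))
    (tup : String × String × String) :
    PySem.Dict (String × String) (List (String × String × String)) :=
  let x := tup.1
  let y := tup.2.1
  if groups.contains (x, y) then groups.modify (x, y) [] (fun g => g ++ [tup])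
  else if groups.contains (y, x) then groups.modify (y, x) [] (fun g => g ++ [tup])
  else groups.insert (x, y) [tup]

def compute_groups (lst : List (String × String × String)) :
    List (List (String × String × String)) :=
  let groups := lst.foldl pvStepA PySem.Dict.empty
  let grouped_tuples := groups.values
  grouped_tuples

def compute_reciprocity (lst : List (String × String × String)) : List (String × Int) :=
  let grouped_tuples := compute_groups lst
  let yes_rec := grouped_tuples.filter (fun group => group.length > 1)
  let no_rec := grouped_tuples.filter (fun group => group.length == 1)
  -- group[0] is exact: every group in `groups` is nonempty
  let yes_rec_actors :=
    yes_rec.map (fun group => (group.headD ("", "", "")).1)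
      ++ yes_rec.map (fun group => (group.headD ("", "", "")).2.1)
  let yes_rec_counter := PySem.Dict.counter yes_rec_actors
  let _no_rec_actors :=
    no_rec.map (fun group => (group.headD ("", "", "")).1)
      ++ no_rec.map (fun group => (group.headD ("", "", "")).2.1)
  yes_rec_counter.items

-- ===== PORT B =====
-- _same(p, q): same unordered pair
def pvSame (p q : String × String) : Bool := p == q || p == (q.2, q.1)

def compute_reciprocity_alt (lst : List (String × String × String)) : List (String × Int) :=
  let pairs := lst.map (fun t => (t.1, t.2.1))
  -- pairs[:i] / pairs[i+1:] are PySem slices (exact; i from enumerate is the Python index)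
  let reps := (PySem.List.enumerate pairs).filterMap (fun ip =>
    if (!((PySem.List.slice pairs none (some ip.1)).any (fun q => pvSame ip.2 q)))
        && ((PySem.List.slice pairs (some (ip.1 + 1)) none).any (fun q => pvSame ip.2 q))
    then some ip.2 else none)
  (PySem.Dict.counter (reps.map (fun r => r.1) ++ reps.map (fun r => r.2))).items

-- ===== PRECONDITION & SPEC =====
def Spec_compute_reciprocity (lst : List (String × String × String)) (out : List (String × Int)) : Prop := out = compute_reciprocity_alt lst
instance (lst : List (String × String × String)) (out : List (String × Int)) : Decidable (Spec_compute_reciprocity lst out) := by unfold Spec_compute_reciprocity; infer_instance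

-- ===== CLAIM (what is proved, stated in full; the proofs are below) =====
def Claim_equal_compute_reciprocity : Prop := ∀ (lst : List (String × String × String)), Dom_compute_reciprocity lst → Spec_compute_reciprocity lst (compute_reciprocity lst)

-- ===== LEMMAS AND PROOFS =====

def pvPair (t : String × String × String) : String × String := (t.1, t.2.1)

-- "a's unordered pair already occurs in ks"
def pvSeen (ks : List (String × String)) (a : String × String) : Bool :=
  ks.any (fun s => pvSame a s)

-- first occurrences (oriented) of the unordered pairs of q, those not already seen in ks
def pvN : List (String × String) → List (String × String) → List (String × String)
  | _, [] => []
  | ks, p :: q => if pvSeen ks p then pvN ks q else p :: pvN (ks ++ [p]) q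

-- B's representative list, with accumulator ks of already-scanned pairs
def pvH : List (String × String) → List (String × String) → List (String × String)
  | _, [] => []
  | ks, p :: q => (if !(pvSeen ks p) && pvSeen q p then [p] else []) ++ pvH (ks ++ [p]) q

def pvVal (pre : List (String × String × String)) (k : String × String) :
    List (String × String × String) :=
  pre.filter (fun t => pvSame (pvPair t) k)

def pvG (pre : List (String × String × String)) :
    List ((String × String) × List (String × String × String)) :=
  (pvN [] (pre.map pvPair)).map (fun k => (k, pvVal pre k))

theorem pvSame_refl (p : String × String) : pvSame p p = true := by simp [pvSame]

theorem pvSame_comm (p q : String × String) : pvSame p q = pvSame q p := by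
  obtain ⟨a, b⟩ := p; obtain ⟨c, d⟩ := q
  rw [Bool.eq_iff_iff]
  simp only [pvSame, Bool.or_eq_true, beq_iff_eq, Prod.mk.injEq]
  tauto

theorem pvSame_trans {p q r : String × String} (h1 : pvSame p q = true)
    (h2 : pvSame q r = true) : pvSame p r = true := by
  obtain ⟨a, b⟩ := p; obtain ⟨c, d⟩ := q; obtain ⟨e, f⟩ := r
  simp only [pvSame, Bool.or_eq_true, beq_iff_eq, Prod.mk.injEq] at *
  rcases h1 with ⟨rfl, rfl⟩ | ⟨rfl, rfl⟩ <;> tauto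

theorem pvSeen_append (ks ks' : List (String × String)) (a : String × String) :
    pvSeen (ks ++ ks') a = (pvSeen ks a || pvSeen ks' a) := by
  simp [pvSeen]

theorem pvSeen_cons (k : String × String) (ks : List (String × String)) (a : String × String) :
    pvSeen (k :: ks) a = (pvSame a k || pvSeen ks a) := by
  simp [pvSeen]

theorem pvSeen_of_same {ks : List (String × String)} {a b : String × String}
    (hab : pvSame a b = true) (hb : pvSeen ks b = true) : pvSeen ks a = true := by
  simp only [pvSeen, List.any_eq_true] at *
  obtain ⟨s, hs, hbs⟩ := hb
  exact ⟨s, hs, pvSame_trans hab hbs⟩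

theorem pvN_not_seen : ∀ (q ks : List (String × String)), ∀ k ∈ pvN ks q, pvSeen ks k = false := by
  intro q
  induction q with
  | nil => intro ks k hk; simp [pvN] at hk
  | cons p q ih =>
    intro ks k hk
    simp only [pvN] at hk
    by_cases hs : pvSeen ks p = true
    · rw [if_pos hs] at hk; exact ih ks k hk
    · rw [if_neg hs] at hk
      rcases List.mem_cons.mp hk with rfl | hk
      · exact Bool.eq_false_iff.mpr hs
      · have := ih (ks ++ [p]) k hk
        rw [pvSeen_append] at this
        exact (Bool.or_eq_false_iff.mp this).1

theorem pvN_pairwise : ∀ (q ks : List (String × String)),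
    (pvN ks q).Pairwise (fun a b => pvSame a b = false) := by
  intro q
  induction q with
  | nil => intro ks; simp [pvN]
  | cons p q ih =>
    intro ks
    simp only [pvN]
    by_cases hs : pvSeen ks p = true
    · rw [if_pos hs]; exact ih ks
    · rw [if_neg hs]
      refine List.Pairwise.cons ?_ (ih (ks ++ [p]))
      intro b hb
      have := pvN_not_seen q (ks ++ [p]) b hb
      rw [pvSeen_append] at this
      have h2 : pvSeen [p] b = false := (Bool.or_eq_false_iff.mp this).2
      have h3 : pvSame b p = false := by
        simpa [pvSeen] using h2
      rw [pvSame_comm]; exact h3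

theorem pvN_cover : ∀ (q ks : List (String × String)), ∀ a ∈ q,
    (pvSeen ks a || pvSeen (pvN ks q) a) = true := by
  intro q
  induction q with
  | nil => intro ks a ha; simp at ha
  | cons p q ih =>
    intro ks a ha
    simp only [pvN]
    by_cases hs : pvSeen ks p = true
    · rw [if_pos hs]
      rcases List.mem_cons.mp ha with rfl | ha
      · rw [hs]; simp
      · exact ih ks a ha
    · rw [if_neg hs]
      rcases List.mem_cons.mp ha with rfl | ha
      · rw [pvSeen_cons, pvSame_refl]; simp
      · have := ih (ks ++ [p]) a ha
        rw [pvSeen_append] at this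
        rw [pvSeen_cons]
        rcases Bool.or_eq_true_iff.mp this with h | h
        · rcases Bool.or_eq_true_iff.mp h with h | h
          · rw [h]; simp
          · have : pvSame a p = true := by simpa [pvSeen] using h
            rw [this]; simp
        · rw [h]; simp

theorem pvN_append : ∀ (q1 q2 ks : List (String × String)),
    pvN ks (q1 ++ q2) = pvN ks q1 ++ pvN (ks ++ pvN ks q1) q2 := by
  intro q1
  induction q1 with
  | nil => intro q2 ks; simp [pvN]
  | cons p q1 ih =>
    intro q2 ks
    simp only [List.cons_append, pvN]
    by_cases hs : pvSeen ks p = true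
    · rw [if_pos hs, if_pos hs]; exact ih q2 ks
    · rw [if_neg hs, if_neg hs]
      rw [ih q2 (ks ++ [p])]
      simp

theorem pvH_congr : ∀ (q ks ks' : List (String × String)),
    (∀ a, pvSeen ks a = pvSeen ks' a) → pvH ks q = pvH ks' q := by
  intro q
  induction q with
  | nil => intro ks ks' _; simp [pvH]
  | cons p q ih =>
    intro ks ks' h
    simp only [pvH, h p]
    congr 1
    exact ih (ks ++ [p]) (ks' ++ [p]) (fun a => by rw [pvSeen_append, pvSeen_append, h a])


theorem pvSeen_closed {ks : List (String × String)} {p : String × String}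
    (hs : pvSeen ks p = true) (a : String × String) : pvSeen (ks ++ [p]) a = pvSeen ks a := by
  rw [pvSeen_append]
  cases h : pvSeen ks a with
  | true => simp
  | false =>
    simp only [Bool.false_or]
    cases h2 : pvSeen [p] a with
    | false => rfl
    | true =>
      have hap : pvSame a p = true := by simpa [pvSeen] using h2
      rw [pvSeen_of_same hap hs] at h
      exact h

theorem pvSame_false_of_mem_pvN {q ks : List (String × String)} {p k : String × String}
    (hk : k ∈ pvN ks q) (hs : pvSeen ks p = true) : pvSame p k = false := by
  by_contra h
  have hpk : pvSame p k = true := Bool.of_not_eq_false h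
  have hkp : pvSame k p = true := by rw [pvSame_comm]; exact hpk
  have := pvSeen_of_same hkp hs
  rw [pvN_not_seen q ks k hk] at this
  exact Bool.false_ne_true this

theorem pvH_eq : ∀ (q ks : List (String × String)),
    pvH ks q = (pvN ks q).filter (fun k => 1 < q.countP (fun a => pvSame a k)) := by
  intro q
  induction q with
  | nil => intro ks; simp [pvH, pvN]
  | cons p q ih =>
    intro ks
    simp only [pvH, pvN]
    by_cases hs : pvSeen ks p = true
    · rw [if_pos hs, hs]
      simp only [Bool.not_true, Bool.false_and, if_neg (Bool.false_ne_true), List.nil_append]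
      rw [pvH_congr q (ks ++ [p]) ks (pvSeen_closed hs), ih ks]
      apply List.filter_congr
      intro k hk
      rw [List.countP_cons]
      have : pvSame p k = false := pvSame_false_of_mem_pvN hk hs
      simp [this]
    · have hs' : pvSeen ks p = false := Bool.eq_false_iff.mpr hs
      rw [if_neg hs, hs']
      simp only [Bool.not_false, Bool.true_and, List.filter_cons]
      have hcnt : q.countP (fun a => pvSame a p) + (if pvSame p p = true then 1 else 0)
          = q.countP (fun a => pvSame a p) + 1 := by rw [pvSame_refl]; simp
      have hpred : (decide (1 < List.countP (fun a => pvSame a p) (p :: q)))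
          = pvSeen q p := by
        rw [List.countP_cons, hcnt]
        rw [Bool.eq_iff_iff]
        simp only [decide_eq_true_eq, pvSeen, List.any_eq_true]
        rw [Nat.lt_add_one_iff_lt_or_eq]
        constructor
        · intro h
          have : 0 < q.countP (fun a => pvSame a p) := by omega
          obtain ⟨x, hx, hpx⟩ := List.countP_pos_iff.mp this
          exact ⟨x, hx, by rw [pvSame_comm]; simpa using hpx⟩
        · intro ⟨x, hx, hpx⟩
          have : 0 < q.countP (fun a => pvSame a p) :=
            List.countP_pos_iff.mpr ⟨x, hx, by rw [pvSame_comm] at hpx; simpa using hpx⟩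
          omega
      have htail : List.filter (fun k => decide (1 < List.countP (fun a => pvSame a k) (p :: q)))
            (pvN (ks ++ [p]) q)
          = List.filter (fun k => decide (1 < List.countP (fun a => pvSame a k) q))
            (pvN (ks ++ [p]) q) := by
        apply List.filter_congr
        intro k hk
        have hks : pvSeen (ks ++ [p]) k = false := pvN_not_seen q (ks ++ [p]) k hk
        rw [pvSeen_append] at hks
        have hkp : pvSame k p = false := by
          have := (Bool.or_eq_false_iff.mp hks).2
          simpa [pvSeen] using this
        have hpk : pvSame p k = false := by rw [pvSame_comm]; exact hkp
        rw [List.countP_cons]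
        simp [hpk]
      rw [hpred, htail, ih (ks ++ [p])]
      cases hq : pvSeen q p <;> simp


-- B's filterMap over enumerate/slices is pvH
theorem pvB_reps : ∀ (q pre : List (String × String)),
    (PySem.List.enumerate q (pre.length : Int)).filterMap (fun ip =>
      if (!((PySem.List.slice (pre ++ q) none (some ip.1)).any (fun s => pvSame ip.2 s)))
          && ((PySem.List.slice (pre ++ q) (some (ip.1 + 1)) none).any (fun s => pvSame ip.2 s))
      then some ip.2 else none) = pvH pre q := by
  intro q
  induction q with
  | nil => intro pre; simp [PySem.List.enumerate, pvH]
  | cons p q ih =>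
    intro pre
    rw [PySem.List.enumerate_cons, List.filterMap_cons]
    have h1 : PySem.List.slice (pre ++ p :: q) none (some ((pre.length : Nat) : Int)) = pre := by
      rw [PySem.List.slice_to_natCast, List.take_left]
    have hlen : ((pre.length : Nat) : Int) + 1 = (((pre ++ [p]).length : Nat) : Int) := by
      simp
    have h2 : PySem.List.slice (pre ++ p :: q) (some (((pre.length : Nat) : Int) + 1)) none = q := by
      rw [hlen, PySem.List.slice_from_natCast]
      rw [show pre ++ p :: q = (pre ++ [p]) ++ q by simp, List.drop_left]
    rw [h1, h2]
    have htail : List.filterMap (fun ip =>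
        if (!((PySem.List.slice (pre ++ p :: q) none (some ip.1)).any fun s => pvSame ip.2 s))
            && ((PySem.List.slice (pre ++ p :: q) (some (ip.1 + 1)) none).any fun s => pvSame ip.2 s)
        then some ip.2 else none) (PySem.List.enumerate q (↑pre.length + 1))
        = pvH (pre ++ [p]) q := by
      rw [show pre ++ p :: q = (pre ++ [p]) ++ q by simp, show ((pre.length : Nat) : Int) + 1 = (((pre ++ [p]).length : Nat) : Int) from hlen]
      exact ih (pre ++ [p])
    rw [htail]
    simp only [pvH, pvSeen]
    by_cases hc : ((!(pre.any fun s => pvSame p s)) && (q.any fun s => pvSame p s)) = true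
    · simp [hc]
    · simp [hc]



theorem pvSame_false_of_ne {q ks : List (String × String)} {a b : String × String}
    (ha : a ∈ pvN ks q) (hb : b ∈ pvN ks q) (hne : a ≠ b) : pvSame a b = false :=
  List.Pairwise.forall (fun {x y} h => by rw [pvSame_comm]; exact h) (pvN_pairwise q ks) ha hb hne

theorem pvN_nodup (q ks : List (String × String)) : (pvN ks q).Nodup :=
  (pvN_pairwise q ks).imp (fun {a b} h heq => by rw [heq, pvSame_refl] at h; exact Bool.noConfusion h)

theorem pvContains_iff (g : PySem.Dict (String × String) (List (String × String × String)))
    (pre : List (String × String × String)) (h : g.items = pvG pre) (w : String × String) :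
    g.contains w = true ↔ w ∈ pvN [] (pre.map pvPair) := by
  simp only [PySem.Dict.contains, h, pvG, List.any_eq_true, List.mem_map, beq_iff_eq]
  constructor
  · rintro ⟨r, ⟨k, hk, rfl⟩, hr⟩
    dsimp at hr
    rwa [hr] at hk
  · intro hw
    exact ⟨(w, pvVal pre w), ⟨w, hw, rfl⟩, rfl⟩

theorem pvKeys_eq (g : PySem.Dict (String × String) (List (String × String × String)))
    (pre : List (String × String × String)) (h : g.items = pvG pre) :
    g.keys = pvN [] (pre.map pvPair) := by
  simp only [PySem.Dict.keys, h, pvG, List.map_map]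
  simp [Function.comp_def]

theorem pvVal_append_singleton (pre : List (String × String × String))
    (t : String × String × String) (k : String × String) :
    pvVal (pre ++ [t]) k = pvVal pre k ++ (if pvSame (pvPair t) k then [t] else []) := by
  simp only [pvVal, List.filter_append, List.filter_cons, List.filter_nil]

theorem pvN_append_singleton (q : List (String × String)) (p : String × String) :
    pvN [] (q ++ [p]) = pvN [] q ++ (if pvSeen (pvN [] q) p then [] else [p]) := by
  rw [pvN_append q [p] [], List.nil_append]
  cases h : pvSeen (pvN [] q) p <;> simp [pvN, h]

theorem pvStepA_modify (g : PySem.Dict (String × String) (List (String × String × String)))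
    (pre : List (String × String × String)) (t : String × String × String) (w : String × String)
    (h : g.items = pvG pre) (hw : w ∈ pvN [] (pre.map pvPair))
    (hpw : pvSame (pvPair t) w = true) :
    (g.modify w [] (fun gp => gp ++ [t])).items = pvG (pre ++ [t]) := by
  have hkeysnd : g.keys.Nodup := by rw [pvKeys_eq g pre h]; exact pvN_nodup _ _
  have hmem : (w, pvVal pre w) ∈ g.items := by
    rw [h, pvG]; exact List.mem_map.mpr ⟨w, hw, rfl⟩
  have hgetd : g.getD w [] = pvVal pre w := PySem.Dict.getD_of_mem_items g hmem hkeysnd []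
  have hcon : g.contains w = true := (pvContains_iff g pre h w).mpr hw
  have hseenp : pvSeen (pvN [] (pre.map pvPair)) (pvPair t) = true :=
    List.any_eq_true.mpr ⟨w, hw, hpw⟩
  simp only [PySem.Dict.modify, hgetd]
  rw [PySem.Dict.items_insert_of_contains g (pvVal pre w ++ [t]) hcon, h]
  simp only [pvG, List.map_append, List.map_cons, List.map_nil, List.map_map]
  rw [pvN_append_singleton, hseenp]
  simp only [if_true, List.append_nil]
  apply List.map_congr_left
  intro k hk
  simp only [Function.comp_def]
  by_cases hkw : k = w
  · subst hkw
    rw [pvVal_append_singleton]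
    simp [hpw]
  · have hne : (k == w) = false := by simp [hkw]
    have hpk : pvSame (pvPair t) k = false := by
      by_contra hc
      have hc' : pvSame (pvPair t) k = true := Bool.of_not_eq_false hc
      have hwp : pvSame w (pvPair t) = true := by rw [pvSame_comm]; exact hpw
      have hwk : pvSame w k = true := pvSame_trans hwp hc'
      rw [pvSame_false_of_ne hw hk (fun he => hkw he.symm)] at hwk
      exact Bool.false_ne_true hwk
    rw [pvVal_append_singleton]
    simp [hne, hpk]

-- A's dict loop maintains pvG
theorem pvStepA_items (g : PySem.Dict (String × String) (List (String × String × String)))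
    (pre : List (String × String × String)) (t : String × String × String)
    (h : g.items = pvG pre) : (pvStepA g t).items = pvG (pre ++ [t]) := by
  have hx : (t.1, t.2.1) = pvPair t := rfl
  simp only [pvStepA]
  by_cases h1 : g.contains (t.1, t.2.1) = true
  · rw [if_pos h1]
    exact pvStepA_modify g pre t (t.1, t.2.1) h
      ((pvContains_iff g pre h _).mp h1) (by rw [hx]; exact pvSame_refl _)
  · rw [if_neg h1]
    by_cases h2 : g.contains (t.2.1, t.1) = true
    · rw [if_pos h2]
      refine pvStepA_modify g pre t (t.2.1, t.1) h ((pvContains_iff g pre h _).mp h2) ?_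
      simp [pvSame, pvPair]
    · rw [if_neg h2]
      have hnx : (t.1, t.2.1) ∉ pvN [] (pre.map pvPair) := fun hm => h1 ((pvContains_iff g pre h _).mpr hm)
      have hny : (t.2.1, t.1) ∉ pvN [] (pre.map pvPair) := fun hm => h2 ((pvContains_iff g pre h _).mpr hm)
      have hseenp : pvSeen (pvN [] (pre.map pvPair)) (pvPair t) = false := by
        rw [Bool.eq_false_iff]
        intro hc
        obtain ⟨s, hs, hps⟩ := List.any_eq_true.mp hc
        simp only [pvSame, Bool.or_eq_true, beq_iff_eq] at hps
        rcases hps with rfl | hps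
        · exact hnx hs
        · obtain ⟨a, b⟩ := s
          simp only [Prod.mk.injEq, pvPair] at hps
          obtain ⟨h3, h4⟩ := hps
          exact hny (by rw [← h3, ← h4] at hs; exact hs)
      have hconf : g.contains (t.1, t.2.1) = false := Bool.eq_false_iff.mpr h1
      rw [PySem.Dict.items_insert_of_not_contains g [t] hconf, h]
      simp only [pvG, List.map_append, List.map_cons, List.map_nil]
      rw [pvN_append_singleton, hseenp]
      simp only [Bool.false_eq_true, if_false, List.map_append]
      congr 1
      · apply List.map_congr_left
        intro k hk
        rw [pvVal_append_singleton]
        have hpk : pvSame (pvPair t) k = false := by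
          by_contra hc
          have hc' : pvSame (pvPair t) k = true := Bool.of_not_eq_false hc
          rw [Bool.eq_false_iff] at hseenp
          exact hseenp (List.any_eq_true.mpr ⟨k, hk, hc'⟩)
        simp [hpk]
      · simp only [List.map_cons, List.map_nil]
        have hvalnil : pvVal pre (pvPair t) = [] := by
          rw [pvVal, List.filter_eq_nil_iff]
          intro u hu hc
          have hc' : pvSame (pvPair u) (pvPair t) = true := by simpa using hc
          have hcov := pvN_cover (pre.map pvPair) [] (pvPair u) (List.mem_map.mpr ⟨u, hu, rfl⟩)
          have hcov' : pvSeen (pvN [] (pre.map pvPair)) (pvPair u) = true := by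
            simpa [pvSeen] using hcov
          obtain ⟨s, hs, hus⟩ := List.any_eq_true.mp hcov'
          have htp : pvSame (pvPair t) s :=
            pvSame_trans (by rw [pvSame_comm]; exact hc') hus
          rw [Bool.eq_false_iff] at hseenp
          exact hseenp (List.any_eq_true.mpr ⟨s, hs, htp⟩)
        rw [pvVal_append_singleton, hvalnil, hx]
        simp [pvSame_refl]


theorem pvInvA (lst : List (String × String × String)) :
    (lst.foldl pvStepA PySem.Dict.empty).items = pvG lst := by
  suffices h : ∀ (rest pre : List (String × String × String))
      (g : PySem.Dict (String × String) (List (String × String × String))),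
      g.items = pvG pre → (rest.foldl pvStepA g).items = pvG (pre ++ rest) by
    have := h lst [] PySem.Dict.empty (by simp [pvG, pvN, PySem.Dict.empty])
    simpa using this
  intro rest
  induction rest with
  | nil => intro pre g hg; simpa using hg
  | cons t rest ih =>
    intro pre g hg
    rw [List.foldl_cons]
    have := ih (pre ++ [t]) (pvStepA g t) (pvStepA_items g pre t hg)
    simpa using this


-- first element of each group carries the key's orientation
theorem pvHead : ∀ (pre : List (String × String × String)) (ks : List (String × String)),
    ∀ k ∈ pvN ks (pre.map pvPair), ∃ c rest, pvVal pre k = (k.1, k.2, c) :: rest := by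
  intro pre
  induction pre with
  | nil => intro ks k hk; simp [pvN] at hk
  | cons t pre ih =>
    intro ks k hk
    simp only [List.map_cons, pvN] at hk
    by_cases hs : pvSeen ks (pvPair t) = true
    · rw [if_pos hs] at hk
      obtain ⟨c, rest, hr⟩ := ih ks k hk
      have hpk : pvSame (pvPair t) k = false := by
        by_contra hc
        have hc' : pvSame (pvPair t) k = true := Bool.of_not_eq_false hc
        have hk' : pvSame k (pvPair t) = true := by rw [pvSame_comm]; exact hc'
        have := pvSeen_of_same hk' hs
        rw [pvN_not_seen _ ks k hk] at this
        exact Bool.false_ne_true this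
      refine ⟨c, rest, ?_⟩
      rw [pvVal, List.filter_cons, show (pvSame (pvPair t) k : Bool) = false from hpk]
      simpa [pvVal] using hr
    · rw [if_neg hs] at hk
      rcases List.mem_cons.mp hk with rfl | hk
      · refine ⟨t.2.2, pvVal pre (pvPair t), ?_⟩
        rw [pvVal, List.filter_cons]
        simp [pvSame_refl, pvVal, pvPair]
      · obtain ⟨c, rest, hr⟩ := ih (ks ++ [pvPair t]) k hk
        have hks : pvSeen (ks ++ [pvPair t]) k = false := pvN_not_seen _ _ k hk
        rw [pvSeen_append] at hks
        have hkt : pvSame k (pvPair t) = false := by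
          have := (Bool.or_eq_false_iff.mp hks).2
          simpa [pvSeen] using this
        have htk : pvSame (pvPair t) k = false := by rw [pvSame_comm]; exact hkt
        refine ⟨c, rest, ?_⟩
        rw [pvVal, List.filter_cons, show (pvSame (pvPair t) k : Bool) = false from htk]
        simpa [pvVal] using hr


-- ===== VERDICT (by name: the statement is the Claim_ definition above) =====
theorem compute_reciprocity_spec : Claim_equal_compute_reciprocity := by
  intro lst _
  unfold Spec_compute_reciprocity compute_reciprocity compute_groups compute_reciprocity_alt
  have hpairs : lst.map (fun t => (t.1, t.2.1)) = lst.map pvPair := rfl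
  have hreps : (PySem.List.enumerate (lst.map pvPair)).filterMap (fun ip =>
      if (!((PySem.List.slice (lst.map pvPair) none (some ip.1)).any (fun q => pvSame ip.2 q)))
          && ((PySem.List.slice (lst.map pvPair) (some (ip.1 + 1)) none).any (fun q => pvSame ip.2 q))
      then some ip.2 else none) = pvH [] (lst.map pvPair) := by
    have := pvB_reps (lst.map pvPair) []
    simpa using this
  have hfilter : pvH [] (lst.map pvPair)
      = (pvN [] (lst.map pvPair)).filter
          (fun k => decide (1 < lst.countP (fun t => pvSame (pvPair t) k))) := by
    rw [pvH_eq]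
    apply List.filter_congr
    intro k _
    rw [List.countP_map]
    rfl
  have hvalues : (lst.foldl pvStepA PySem.Dict.empty).values
      = (pvN [] (lst.map pvPair)).map (fun k => pvVal lst k) := by
    simp only [PySem.Dict.values, pvInvA, pvG, List.map_map]
    simp [Function.comp_def]
  have hyes : ((lst.foldl pvStepA PySem.Dict.empty).values).filter (fun group => group.length > 1)
      = ((pvN [] (lst.map pvPair)).filter
          (fun k => decide (1 < lst.countP (fun t => pvSame (pvPair t) k)))).map
          (fun k => pvVal lst k) := by
    rw [hvalues, List.filter_map]
    congr 1
    apply List.filter_congr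
    intro k _
    simp only [Function.comp_def, pvVal]
    rw [← List.countP_eq_length_filter]
  have hhead1 : ∀ k ∈ (pvN [] (lst.map pvPair)).filter
      (fun k => decide (1 < lst.countP (fun t => pvSame (pvPair t) k))),
      ((pvVal lst k).headD ("", "", "")).1 = k.1 ∧ ((pvVal lst k).headD ("", "", "")).2.1 = k.2 := by
    intro k hk
    obtain ⟨c, rest, hr⟩ := pvHead lst [] k (List.mem_of_mem_filter hk)
    rw [hr]
    exact ⟨rfl, rfl⟩
  simp only [hpairs, hreps, hfilter, hyes, List.map_map]
  congr 2
  simp only [Function.comp_def]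
  rw [List.map_congr_left (fun k hk => (hhead1 k hk).1),
    List.map_congr_left (fun k hk => (hhead1 k hk).2)]
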